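-- pv_equiv track=rewrite | github.com/MichaelJSr/Elemental_Games_Modding | azurik_mod/randomizer/shufflers.py | _power_element
-- ===== SOURCE A (Python) =====
-- POWER_ELEMENTS = ["water", "air", "earth", "fire", "ammo", "life", "staff"]
--
-- def _power_element(name: str) -> str | None:
--     """Extract the element type from a power-up entity name.
--
--     power_water_a3 -> water, power_fire -> fire, power_ammo -> ammo
--     """
--     if not name.startswith("power_"):
--         return None
--     rest = name[6:]  # strip "power_"
--     for elem in POWER_ELEMENTS:
--         if rest == elem or rest.startswith(elem + "_") or rest.startswith(elem) and rest[len(elem):].isdigit():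
--             return elem
--     return None
-- ===== SOURCE B (Python) =====
-- POWER_ELEMENTS = ["water", "air", "earth", "fire", "ammo", "life", "staff"]
-- _POWER_SET = set(POWER_ELEMENTS)
--
--
-- def _power_element(name: str) -> str | None:
--     """Extract the element type from a power-up entity name.
--
--     One forward scan to the first '_' or digit finds the element boundary;
--     a set membership test replaces trying every element as a prefix.
--     """
--     if not name.startswith("power_"):
--         return None
--     rest = name[6:]
--     i = 0
--     while i < len(rest) and rest[i] != '_' and not rest[i].isdigit():
--         i += 1
--     head, tail = rest[:i], rest[i:]
--     if head in _POWER_SET and (tail == '' or tail[0] == '_' or tail.isdigit()):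
--         return head
--     return None
-- ===== Notes on version B (the rewrite author's own statement) =====
-- stated objective: idiomatic
-- what changed: Instead of trying each of the 7 elements as a prefix of rest (three startswith-style tests per element), B scans rest once to the first underscore-or-digit boundary and then does a single set-membership test on the head plus one check on the tail.
import Mathlib
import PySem

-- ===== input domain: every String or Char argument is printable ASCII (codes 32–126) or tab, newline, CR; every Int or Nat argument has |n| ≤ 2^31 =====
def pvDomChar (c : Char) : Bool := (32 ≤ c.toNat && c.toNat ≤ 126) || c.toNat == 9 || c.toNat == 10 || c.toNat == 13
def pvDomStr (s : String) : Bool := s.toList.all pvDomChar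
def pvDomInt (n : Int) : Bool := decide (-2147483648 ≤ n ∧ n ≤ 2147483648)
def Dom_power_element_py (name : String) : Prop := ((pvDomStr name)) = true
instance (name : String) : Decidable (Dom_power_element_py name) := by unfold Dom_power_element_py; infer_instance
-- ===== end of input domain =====

-- B replaces A's try-every-element prefix loop by one forward scan to the first '_'/digit
-- boundary plus a set membership test on the head (objective: idiomatic single pass).
-- (String constants are kept as List Char literals, PySem's native string representation.)

-- ===== PORT A =====
def POWER_ELEMENTS : List (List Char) :=
  [['w','a','t','e','r'], ['a','i','r'], ['e','a','r','t','h'], ['f','i','r','e'],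
   ['a','m','m','o'], ['l','i','f','e'], ['s','t','a','f','f']]

-- A's `for elem in POWER_ELEMENTS:` loop with its early `return elem`
def powLoopA (rest : List Char) : List (List Char) → Option String
  | [] => none
  | e :: es =>
      if rest == e
          || PySem.Chars.startswith rest (e ++ ['_'])
          || (PySem.Chars.startswith rest e
              && PySem.Chars.strIsdigit (PySem.List.slice rest (some (e.length : Int)) none))
      then some (String.ofList e) else powLoopA rest es

def power_element_py (name : String) : Option String :=
  if PySem.Str.startswith name "power_" then
    powLoopA (PySem.List.slice name.toList (some 6) none) POWER_ELEMENTS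
  else none

-- ===== PORT B =====
-- `rest[i] != '_' and not rest[i].isdigit()` — the scan's continue-condition
def pvKeep (c : Char) : Bool := !(c == '_' || PySem.Chars.isdigit c)

def POWER_SET : List (List Char) := PySem.Set.ofList POWER_ELEMENTS

def power_element_py_alt (name : String) : Option String :=
  if PySem.Str.startswith name "power_" then
    let rest := PySem.List.slice name.toList (some 6) none
    let head := rest.takeWhile pvKeep   -- the `while` scan: rest[:i]
    let tail := rest.dropWhile pvKeep   -- rest[i:]
    if POWER_SET.contains head
        && (tail == ([] : List Char) || tail.head? == some '_' || PySem.Chars.strIsdigit tail)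
    then some (String.ofList head) else none
  else none

-- ===== PRECONDITION & SPEC =====
def Spec_power_element_py (name : String) (out : Option String) : Prop := out = power_element_py_alt name
instance (name : String) (out : Option String) : Decidable (Spec_power_element_py name out) := by unfold Spec_power_element_py; infer_instance

-- ===== CLAIM (what is proved, stated in full; the proofs are below) =====
def Claim_equal_power_element_py : Prop := ∀ (name : String), Dom_power_element_py name → Spec_power_element_py name (power_element_py name)

-- ===== LEMMAS AND PROOFS =====

lemma pv_tw_app (q : Char → Bool) (l t : List Char) (h : ∀ c ∈ l, q c = true) :
    (l ++ t).takeWhile q = l ++ t.takeWhile q ∧ (l ++ t).dropWhile q = t.dropWhile q := by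
  induction l with
  | nil => simp
  | cons a l ih =>
      have ha := h a (by simp)
      have := ih (fun c hc => h c (by simp [hc]))
      simp [ha, this.1, this.2]

-- A's per-element success condition characterised by B's head/tail split
lemma pv_condA_iff (e rest : List Char) (he : ∀ c ∈ e, pvKeep c = true) :
    (rest = e ∨ (e ++ ['_']) <+: rest ∨ (e <+: rest ∧ PySem.Chars.strIsdigit (rest.drop e.length) = true))
    ↔ (rest.takeWhile pvKeep = e ∧
       (rest.dropWhile pvKeep = [] ∨
        (rest.dropWhile pvKeep).head? = some '_' ∨
        PySem.Chars.strIsdigit (rest.dropWhile pvKeep) = true)) := by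
  constructor
  · rintro (h1 | ⟨s, rfl⟩ | ⟨⟨t, rfl⟩, hd⟩)
    · subst h1
      have h := pv_tw_app pvKeep rest [] he
      simp only [List.append_nil, List.takeWhile_nil, List.dropWhile_nil] at h
      exact ⟨h.1, Or.inl h.2⟩
    · have h := pv_tw_app pvKeep e ('_' :: s) he
      have h_ : pvKeep '_' = false := by decide
      rw [List.takeWhile_cons_of_neg (by simp [h_]), List.dropWhile_cons_of_neg (by simp [h_])] at h
      simp only [List.append_assoc, List.singleton_append]
      refine ⟨by rw [h.1]; simp, Or.inr (Or.inl (by rw [h.2]; rfl))⟩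
    · rw [List.drop_left] at hd
      have h := pv_tw_app pvKeep e t he
      have ht : t.takeWhile pvKeep = [] ∧ t.dropWhile pvKeep = t := by
        unfold PySem.Chars.strIsdigit at hd
        cases t with
        | nil => simp
        | cons c s =>
            simp only [Bool.and_eq_true, List.all_cons] at hd
            have hc : pvKeep c = false := by simp [pvKeep, hd.2.1]
            exact ⟨List.takeWhile_cons_of_neg (by simp [hc]),
                   List.dropWhile_cons_of_neg (by simp [hc])⟩
      refine ⟨?_, Or.inr (Or.inr ?_)⟩
      · rw [h.1, ht.1, List.append_nil]
      · rw [h.2, ht.2]; exact hd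
  · rintro ⟨hh, ht⟩
    have hsplit : rest = e ++ rest.dropWhile pvKeep := by
      conv_lhs => rw [← List.takeWhile_append_dropWhile (p := pvKeep) (l := rest)]
      rw [hh]
    rcases ht with h0 | h1 | h2
    · left; rw [hsplit, h0, List.append_nil]
    · right; left
      rcases hd : rest.dropWhile pvKeep with _ | ⟨c, s⟩
      · rw [hd] at h1; simp at h1
      · rw [hd] at h1
        simp only [List.head?_cons, Option.some.injEq] at h1
        subst h1
        exact ⟨s, by rw [hsplit, hd]; simp⟩
    · right; right
      refine ⟨⟨rest.dropWhile pvKeep, hsplit.symm⟩, ?_⟩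
      rw [hsplit, List.drop_left]
      exact h2

-- the loop over any list of boundary-free element names equals B's membership test
lemma pv_loop_eq (rest : List Char) (es : List (List Char))
    (h : ∀ e ∈ es, ∀ c ∈ e, pvKeep c = true) :
    powLoopA rest es =
      (if es.contains (rest.takeWhile pvKeep)
          && ((rest.dropWhile pvKeep) == ([] : List Char)
              || (rest.dropWhile pvKeep).head? == some '_'
              || PySem.Chars.strIsdigit (rest.dropWhile pvKeep))
       then some (String.ofList (rest.takeWhile pvKeep)) else none) := by
  induction es with
  | nil => simp [powLoopA]
  | cons e es ih =>
      have hiff := pv_condA_iff e rest (h e (by simp))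
      have hih := ih (fun x hx => h x (by simp [hx]))
      rw [powLoopA]
      by_cases hc : rest = e ∨ (e ++ ['_']) <+: rest ∨
          (e <+: rest ∧ PySem.Chars.strIsdigit (rest.drop e.length) = true)
      · have hcond : (rest == e
            || PySem.Chars.startswith rest (e ++ ['_'])
            || (PySem.Chars.startswith rest e
                && PySem.Chars.strIsdigit (PySem.List.slice rest (some (e.length : Int)) none))) = true := by
          rw [PySem.List.slice_from rest (by positivity), Int.toNat_natCast]
          simp only [Bool.or_eq_true, Bool.and_eq_true, beq_iff_eq, PySem.Chars.startswith_iff]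
          tauto
        rw [if_pos hcond]
        obtain ⟨hh, ht⟩ := hiff.mp hc
        have hcont : (e :: es).contains (rest.takeWhile pvKeep) = true := by
          simp [hh]
        have htb : ((rest.dropWhile pvKeep) == ([] : List Char)
              || (rest.dropWhile pvKeep).head? == some '_'
              || PySem.Chars.strIsdigit (rest.dropWhile pvKeep)) = true := by
          simp only [Bool.or_eq_true, beq_iff_eq]
          tauto
        rw [hcont, htb, hh]
        simp
      · have hcond : (rest == e
            || PySem.Chars.startswith rest (e ++ ['_'])
            || (PySem.Chars.startswith rest e
                && PySem.Chars.strIsdigit (PySem.List.slice rest (some (e.length : Int)) none))) = false := by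
          rw [PySem.List.slice_from rest (by positivity), Int.toNat_natCast]
          simp only [not_or, not_and] at hc
          obtain ⟨h1, h2, h3⟩ := hc
          have h1' : (rest == e) = false := by simp [h1]
          have h2' : PySem.Chars.startswith rest (e ++ ['_']) = false := by
            by_cases hsw : PySem.Chars.startswith rest (e ++ ['_']) = true
            · rw [PySem.Chars.startswith_iff] at hsw
              exact absurd hsw h2
            · simpa using hsw
          have h3' : (PySem.Chars.startswith rest e
              && PySem.Chars.strIsdigit (rest.drop e.length)) = false := by
            by_cases hsw : PySem.Chars.startswith rest e = true
            · have hpre := hsw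
              rw [PySem.Chars.startswith_iff] at hpre
              have hnd := h3 hpre
              simp only [Bool.not_eq_true] at hnd
              simp [hsw, hnd]
            · simp only [Bool.not_eq_true] at hsw
              simp [hsw]
          rw [h1', h2', h3']
          rfl
        rw [if_neg (by rw [hcond]; simp), hih]
        by_cases htb : ((rest.dropWhile pvKeep) == ([] : List Char)
              || (rest.dropWhile pvKeep).head? == some '_'
              || PySem.Chars.strIsdigit (rest.dropWhile pvKeep)) = true
        · have htb' := htb
          simp only [Bool.or_eq_true, beq_iff_eq] at htb'
          have hne : rest.takeWhile pvKeep ≠ e := by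
            intro habs
            exact hc (hiff.mpr ⟨habs, by tauto⟩)
          have : (e :: es).contains (rest.takeWhile pvKeep)
               = es.contains (rest.takeWhile pvKeep) := by
            simp [hne]
          rw [this]
        · simp only [Bool.not_eq_true] at htb
          rw [htb]
          simp

lemma pv_keep_all : ∀ e ∈ POWER_ELEMENTS, ∀ c ∈ e, pvKeep c = true := by
  have h : POWER_ELEMENTS.all (fun e => e.all pvKeep) = true := rfl
  simp only [List.all_eq_true] at h
  exact h

lemma pv_set_eq : POWER_SET = POWER_ELEMENTS := rfl

-- ===== VERDICT (by name: the statement is the Claim_ definition above) =====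
theorem power_element_py_spec : Claim_equal_power_element_py := by
  unfold Claim_equal_power_element_py
  intro name _
  unfold Spec_power_element_py power_element_py power_element_py_alt
  by_cases h : PySem.Str.startswith name "power_" = true
  · rw [if_pos h, if_pos h]
    rw [pv_loop_eq _ POWER_ELEMENTS pv_keep_all, pv_set_eq]
  · rw [if_neg h, if_neg h]
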